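-- pv_equiv track=rewrite | github.com/VoiceofSiren/StudyingProgramming | Python/Coding Test/Programmers/lv1/p-049.py | solution
-- ===== SOURCE A (Python) =====
-- def solution(cards1, cards2, goal):
--     for g in goal:
--         if g not in cards1 + cards2:
--             return 'No'
--         if len(cards1) > 0 and len(cards2) == 0:
--             if g == cards1[0]:
--                 cards1 = cards1[1:]
--             else:
--                 return 'No'
--         elif len(cards1) == 0 and len(cards2) > 0:
--             if g == cards2[0]:
--                 cards2 = cards2[1:]
--             else:
--                 return 'No'
--         elif len(cards1) > 0 and len(cards2) > 0:
--             if g in [cards1[0], cards2[0]]: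
--                 if g == cards1[0]:
--                     cards1 = cards1[1:]
--                 else:
--                     cards2 = cards2[1:]
--         else:
--             return 'No'
--
--     return 'Yes'
-- ===== SOURCE B (Python) =====
-- def solution(cards1, cards2, goal):
--     i = j = 0
--     for g in goal:
--         if i < len(cards1) and g == cards1[i]:
--             i += 1
--         elif j < len(cards2) and g == cards2[j]:
--             j += 1
--         else:
--             return 'No'
--     return 'Yes'
-- ===== Notes on version B (the rewrite author's own statement) =====
-- stated objective: faster
-- what changed: Replaces per-step list concatenation/slicing and membership scans with two index pointers advanced in a single pass; a goal word that matches neither front is rejected immediately.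
-- intended difference: On inputs whose goal can only be dealt by skipping a word that is buried inside a pile while both piles are nonempty, A silently takes no card and can end up returning 'Yes' although the word is never actually drawn; B returns the intended 'No'. — e.g. on solution(["a", "x"], ["b"], ["x"]): A returns "Yes", B returns "No"
import Mathlib
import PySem

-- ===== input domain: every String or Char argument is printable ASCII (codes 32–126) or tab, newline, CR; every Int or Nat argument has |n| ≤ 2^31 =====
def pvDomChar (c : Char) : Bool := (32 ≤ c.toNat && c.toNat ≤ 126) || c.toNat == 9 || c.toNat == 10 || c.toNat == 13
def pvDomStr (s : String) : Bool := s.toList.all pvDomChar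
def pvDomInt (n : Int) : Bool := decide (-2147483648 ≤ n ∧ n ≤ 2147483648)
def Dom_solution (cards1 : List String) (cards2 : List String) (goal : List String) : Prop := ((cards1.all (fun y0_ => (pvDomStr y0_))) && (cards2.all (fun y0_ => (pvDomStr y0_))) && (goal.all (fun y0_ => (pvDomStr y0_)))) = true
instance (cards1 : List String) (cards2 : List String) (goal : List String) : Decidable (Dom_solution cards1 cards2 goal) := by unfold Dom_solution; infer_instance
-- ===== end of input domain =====

-- B is the standard single-pass two-pointer solution (objective: faster); where A's
-- silent skip lets an undrawable goal word pass, B returns 'No' (see D_solution).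

-- ===== PORT A =====
-- loop over goal, shrinking the two piles by slicing exactly as A does
def solGo (c1 : List String) (c2 : List String) : List String → String
  | [] => "Yes"
  | g :: gs =>
    if g ∉ c1 ++ c2 then "No"
    else if 0 < c1.length ∧ c2.length = 0 then
      if g = c1.getD 0 "" then solGo (c1.drop 1) c2 gs else "No"
    else if c1.length = 0 ∧ 0 < c2.length then
      if g = c2.getD 0 "" then solGo c1 (c2.drop 1) gs else "No"
    else if 0 < c1.length ∧ 0 < c2.length then
      if g ∈ [c1.getD 0 "", c2.getD 0 ""] then
        if g = c1.getD 0 "" then solGo (c1.drop 1) c2 gs else solGo c1 (c2.drop 1) gs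
      else solGo c1 c2 gs
    else "No"

def solution (cards1 : List String) (cards2 : List String) (goal : List String) : String :=
  solGo cards1 cards2 goal

-- ===== PORT B =====
-- single pass over goal with index pointers i, j into the fixed piles
def altGo (cards1 : List String) (cards2 : List String) : List String → Nat → Nat → String
  | [], _, _ => "Yes"
  | g :: gs, i, j =>
    if i < cards1.length ∧ g = cards1.getD i "" then altGo cards1 cards2 gs (i + 1) j
    else if j < cards2.length ∧ g = cards2.getD j "" then altGo cards1 cards2 gs i (j + 1)
    else "No"

def solution_alt (cards1 : List String) (cards2 : List String) (goal : List String) : String :=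
  altGo cards1 cards2 goal 0 0

-- ===== PRECONDITION & SPEC =====
-- D_solution: the goal sequence can be dealt under the game's rules only by passing over
-- a goal word that is buried in a pile while both piles still hold cards; there A returns
-- 'Yes' although that word is never actually drawn, and B returns the intended 'No'.
-- dealGame is the rulebook as a predicate on the input: a word matching a front is drawn;
-- with both piles open, a word matching neither front must still lie in a pile and the
-- turn passes (recorded in sk); once a pile is empty every word must match the other front.
def dealGame : List String → List String → List String → Bool → Bool
  | [], _, _, sk => sk
  | _ :: _, [], [], _ => false
  | g :: gs, x :: t1, [], sk => decide (g = x) && dealGame gs t1 [] sk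
  | g :: gs, [], y :: t2, sk => decide (g = y) && dealGame gs [] t2 sk
  | g :: gs, x :: t1, y :: t2, sk =>
    if g = x then dealGame gs t1 (y :: t2) sk
    else if g = y then dealGame gs (x :: t1) t2 sk
    else decide (g ∈ t1 ++ t2) && dealGame gs (x :: t1) (y :: t2) true

def D_solution (cards1 : List String) (cards2 : List String) (goal : List String) : Prop :=
  dealGame goal cards1 cards2 false = true
instance (cards1 : List String) (cards2 : List String) (goal : List String) : Decidable (D_solution cards1 cards2 goal) := by unfold D_solution; infer_instance

def Spec_solution (cards1 : List String) (cards2 : List String) (goal : List String) (out : String) : Prop := ¬ D_solution cards1 cards2 goal → out = solution_alt cards1 cards2 goal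
instance (cards1 : List String) (cards2 : List String) (goal : List String) (out : String) : Decidable (Spec_solution cards1 cards2 goal out) := by unfold Spec_solution; infer_instance

def pvDiffWitness_solution : List String × List String × List String := (["a", "x"], ["b"], ["x"])
def pvDiffWitnessOut_solution : String × String := ("Yes", "No")

-- ===== CLAIM =====
def Claim_unchanged_solution : Prop := ∀ (cards1 : List String) (cards2 : List String) (goal : List String), Dom_solution cards1 cards2 goal → Spec_solution cards1 cards2 goal (solution cards1 cards2 goal)
def Claim_changed_solution : Prop := Dom_solution (pvDiffWitness_solution.1) (pvDiffWitness_solution.2.1) (pvDiffWitness_solution.2.2) ∧ D_solution (pvDiffWitness_solution.1) (pvDiffWitness_solution.2.1) (pvDiffWitness_solution.2.2) ∧ solution (pvDiffWitness_solution.1) (pvDiffWitness_solution.2.1) (pvDiffWitness_solution.2.2) = pvDiffWitnessOut_solution.1 ∧ solution_alt (pvDiffWitness_solution.1) (pvDiffWitness_solution.2.1) (pvDiffWitness_solution.2.2) = pvDiffWitnessOut_solution.2 ∧ pvDiffWitnessOut_solution.1 ≠ pvDiffWitnessOut_solution.2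
def Claim_exact_solution : Prop := ∀ (cards1 : List String) (cards2 : List String) (goal : List String), Dom_solution cards1 cards2 goal → D_solution cards1 cards2 goal → solution cards1 cards2 goal ≠ solution_alt cards1 cards2 goal

-- ===== LEMMAS AND PROOFS =====

-- A's loop only ever returns "Yes" or "No"
lemma solGo_yes_or_no (gs : List String) : ∀ (c1 c2 : List String),
    solGo c1 c2 gs = "Yes" ∨ solGo c1 c2 gs = "No" := by
  induction gs with
  | nil => intro c1 c2; exact Or.inl rfl
  | cons g gs ih =>
    intro c1 c2
    simp only [solGo]
    split_ifs <;> first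
      | exact Or.inr rfl
      | exact ih _ _

-- shape lemmas: one step of A's loop on each pile shape
lemma solGo_nil_nil (g : String) (gs : List String) :
    solGo [] [] (g :: gs) = "No" := by
  simp [solGo]

lemma solGo_cons_nil (x g : String) (t1 gs : List String) :
    solGo (x :: t1) [] (g :: gs) = if g = x then solGo t1 [] gs else "No" := by
  by_cases e : g = x
  · simp [solGo, e]
  · by_cases hm : g ∈ t1 <;> simp [solGo, e, hm]

lemma solGo_nil_cons (y g : String) (t2 gs : List String) :
    solGo [] (y :: t2) (g :: gs) = if g = y then solGo [] t2 gs else "No" := by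
  by_cases e : g = y
  · simp [solGo, e]
  · by_cases hm : g ∈ t2 <;> simp [solGo, e, hm]

lemma solGo_cons_cons (x y g : String) (t1 t2 gs : List String) :
    solGo (x :: t1) (y :: t2) (g :: gs) =
      if g = x then solGo t1 (y :: t2) gs
      else if g = y then solGo (x :: t1) t2 gs
      else if g ∈ t1 ++ t2 then solGo (x :: t1) (y :: t2) gs else "No" := by
  have hC1 : ¬ (0 < (x :: t1).length ∧ ((y :: t2) : List String).length = 0) := by simp
  have hC2 : ¬ (((x :: t1) : List String).length = 0 ∧ 0 < (y :: t2).length) := by simp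
  have hC3 : 0 < (x :: t1).length ∧ 0 < (y :: t2).length := by simp
  simp only [solGo, List.getD_cons_zero, List.drop_succ_cons, List.drop_zero]
  rw [if_neg hC1, if_neg hC2, if_pos hC3]
  by_cases e1 : g = x
  · have hg : ¬ g ∉ (x :: t1) ++ (y :: t2) := not_not_intro (by simp [e1])
    have hm4 : g ∈ [x, y] := by simp [e1]
    rw [if_neg hg, if_pos hm4, if_pos e1, if_pos e1]
  · by_cases e2 : g = y
    · have hg : ¬ g ∉ (x :: t1) ++ (y :: t2) := not_not_intro (by simp [e2])
      have hm4 : g ∈ [x, y] := by simp [e2]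
      rw [if_neg hg, if_pos hm4, if_neg e1, if_neg e1, if_pos e2]
    · by_cases hm : g ∈ t1 ++ t2
      · have hg : ¬ g ∉ (x :: t1) ++ (y :: t2) := by
          rcases List.mem_append.mp hm with h | h
          · exact not_not_intro (List.mem_append.mpr (Or.inl (List.mem_cons_of_mem x h)))
          · exact not_not_intro (List.mem_append.mpr (Or.inr (List.mem_cons_of_mem y h)))
        have hm4 : g ∉ [x, y] := by
          intro h
          rcases List.mem_pair.mp h with h | h
          exacts [e1 h, e2 h]
        rw [if_neg hg, if_neg hm4, if_neg e1, if_neg e2, if_pos hm]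
      · have hg : g ∉ (x :: t1) ++ (y :: t2) := by
          intro h
          rcases List.mem_append.mp h with h | h
          · rcases List.mem_cons.mp h with h | h
            exacts [e1 h, hm (List.mem_append.mpr (Or.inl h))]
          · rcases List.mem_cons.mp h with h | h
            exacts [e2 h, hm (List.mem_append.mpr (Or.inr h))]
        rw [if_pos hg, if_neg e1, if_neg e2, if_neg hm]

-- once a pass has happened, the referee just records whether A finishes with "Yes"
lemma dealGame_flagged (gs : List String) : ∀ (c1 c2 : List String),
    dealGame gs c1 c2 true = true ↔ solGo c1 c2 gs = "Yes" := by
  induction gs with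
  | nil => intro c1 c2; simp [dealGame, solGo]
  | cons g gs ih =>
    intro c1 c2
    match c1, c2 with
    | [], [] => simp [dealGame, solGo_nil_nil]
    | x :: t1, [] =>
      rw [solGo_cons_nil]
      simp only [dealGame]
      by_cases e : g = x
      · rw [decide_eq_true e, Bool.true_and, if_pos e]
        exact ih t1 []
      · rw [decide_eq_false e, Bool.false_and, if_neg e]
        simp
    | [], y :: t2 =>
      rw [solGo_nil_cons]
      simp only [dealGame]
      by_cases e : g = y
      · rw [decide_eq_true e, Bool.true_and, if_pos e]
        exact ih [] t2
      · rw [decide_eq_false e, Bool.false_and, if_neg e]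
        simp
    | x :: t1, y :: t2 =>
      rw [solGo_cons_cons]
      simp only [dealGame]
      by_cases e1 : g = x
      · rw [if_pos e1, if_pos e1]
        exact ih t1 (y :: t2)
      · rw [if_neg e1, if_neg e1]
        by_cases e2 : g = y
        · rw [if_pos e2, if_pos e2]
          exact ih (x :: t1) t2
        · rw [if_neg e2, if_neg e2]
          by_cases hm : g ∈ t1 ++ t2
          · rw [if_pos hm, decide_eq_true hm, Bool.true_and]
            exact ih (x :: t1) (y :: t2)
          · rw [if_neg hm, decide_eq_false hm, Bool.false_and]
            simp

-- head/tail of a dropped list in terms of the pointer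
lemma drop_cons_of_lt (c : List String) (i : Nat) (h : i < c.length) :
    c.drop i = c.getD i "" :: c.drop (i + 1) := by
  rw [List.getD_eq_getElem?_getD, List.getElem?_eq_getElem h]
  exact List.drop_eq_getElem_cons h

-- main invariant: the referee's verdict splits the runs of the two ports
lemma go_cases (gs : List String) : ∀ (c1 c2 : List String) (i j : Nat),
    i ≤ c1.length → j ≤ c2.length →
    (dealGame gs (c1.drop i) (c2.drop j) false = true →
      solGo (c1.drop i) (c2.drop j) gs = "Yes" ∧ altGo c1 c2 gs i j = "No") ∧
    (dealGame gs (c1.drop i) (c2.drop j) false = false →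
      solGo (c1.drop i) (c2.drop j) gs = altGo c1 c2 gs i j) := by
  induction gs with
  | nil =>
    intro c1 c2 i j hi hj
    constructor
    · intro h; simp [dealGame] at h
    · intro _; rfl
  | cons g gs ih =>
    intro c1 c2 i j hi hj
    by_cases hi1 : i < c1.length
    · have hdr1 := drop_cons_of_lt c1 i hi1
      by_cases hj1 : j < c2.length
      · -- both piles still have cards
        have hdr2 := drop_cons_of_lt c2 j hj1
        rw [hdr1, hdr2, solGo_cons_cons]
        simp only [dealGame, altGo]
        by_cases e1 : g = c1.getD i ""
        · rw [if_pos e1, if_pos e1, if_pos ⟨hi1, e1⟩, ← hdr2]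
          exact ih c1 c2 (i + 1) j (by omega) hj
        · have i1 : ¬ (i < c1.length ∧ g = c1.getD i "") := fun h => e1 h.2
          by_cases e2 : g = c2.getD j ""
          · rw [if_neg e1, if_neg e1, if_pos e2, if_pos e2, if_neg i1,
              if_pos ⟨hj1, e2⟩, ← hdr1]
            exact ih c1 c2 i (j + 1) hi (by omega)
          · -- A passes over g, B returns "No"
            have j2 : ¬ (j < c2.length ∧ g = c2.getD j "") := fun h => e2 h.2
            rw [if_neg e1, if_neg e1, if_neg e2, if_neg e2, if_neg i1, if_neg j2]
            by_cases hm : g ∈ c1.drop (i + 1) ++ c2.drop (j + 1)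
            · rw [if_pos hm, decide_eq_true hm, Bool.true_and]
              constructor
              · intro h
                exact ⟨(dealGame_flagged gs _ _).mp h, rfl⟩
              · intro h
                rcases solGo_yes_or_no gs (c1.getD i "" :: c1.drop (i + 1))
                    (c2.getD j "" :: c2.drop (j + 1)) with hy | hn
                · exact absurd ((dealGame_flagged gs _ _).mpr hy) (by rw [h]; simp)
                · rw [hn]
            · rw [if_neg hm, decide_eq_false hm, Bool.false_and]
              exact ⟨fun h => absurd h (by simp), fun _ => rfl⟩
      · -- pile 2 is exhausted
        have hdr2 : c2.drop j = [] := List.drop_eq_nil_of_le (by omega)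
        rw [hdr1, hdr2, solGo_cons_nil]
        simp only [dealGame, altGo]
        have j2 : ¬ (j < c2.length ∧ g = c2.getD j "") := fun h => by omega
        by_cases e : g = c1.getD i ""
        · rw [if_pos e, decide_eq_true e, Bool.true_and, if_pos ⟨hi1, e⟩, ← hdr2]
          exact ih c1 c2 (i + 1) j (by omega) hj
        · have i1 : ¬ (i < c1.length ∧ g = c1.getD i "") := fun h => e h.2
          rw [if_neg e, decide_eq_false e, Bool.false_and, if_neg i1, if_neg j2]
          exact ⟨fun h => absurd h (by simp), fun _ => rfl⟩
    · have hdr1 : c1.drop i = [] := List.drop_eq_nil_of_le (by omega)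
      have i1 : ¬ (i < c1.length ∧ g = c1.getD i "") := fun h => by omega
      by_cases hj1 : j < c2.length
      · -- pile 1 is exhausted
        have hdr2 := drop_cons_of_lt c2 j hj1
        rw [hdr1, hdr2, solGo_nil_cons]
        simp only [dealGame, altGo]
        by_cases e : g = c2.getD j ""
        · rw [if_pos e, decide_eq_true e, Bool.true_and, if_neg i1, if_pos ⟨hj1, e⟩, ← hdr1]
          exact ih c1 c2 i (j + 1) hi (by omega)
        · have j2 : ¬ (j < c2.length ∧ g = c2.getD j "") := fun h => e h.2
          rw [if_neg e, decide_eq_false e, Bool.false_and, if_neg i1, if_neg j2]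
          exact ⟨fun h => absurd h (by simp), fun _ => rfl⟩
      · -- both piles are exhausted
        have hdr2 : c2.drop j = [] := List.drop_eq_nil_of_le (by omega)
        have j2 : ¬ (j < c2.length ∧ g = c2.getD j "") := fun h => by omega
        rw [hdr1, hdr2, solGo_nil_nil]
        simp only [dealGame, altGo]
        rw [if_neg i1, if_neg j2]
        exact ⟨fun h => absurd h (by simp), fun _ => rfl⟩

-- ===== VERDICT =====
theorem solution_spec : Claim_unchanged_solution := by
  intro c1 c2 goal _ hD
  have hf : dealGame goal c1 c2 false = false := by
    unfold D_solution at hD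
    exact Bool.not_eq_true _ ▸ eq_false_of_ne_true hD
  have h := (go_cases goal c1 c2 0 0 (by omega) (by omega)).2
  simp only [List.drop_zero] at h
  exact h hf

theorem solution_changed : Claim_changed_solution := by
  unfold Claim_changed_solution; decide

theorem solution_tight : Claim_exact_solution := by
  intro c1 c2 goal _ hD
  have h := (go_cases goal c1 c2 0 0 (by omega) (by omega)).1
  simp only [List.drop_zero] at h
  obtain ⟨hy, hn⟩ := h hD
  unfold solution solution_alt
  rw [hy, hn]
  simp
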